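-- pv_equiv track=rewrite | github.com/Jasson-01/UBA-IP-2024 | Parciales_Python/Parcial-10-(2024-2C)/una_solucion.py | subsecuencia_mas_larga_version_2
-- ===== SOURCE A (Python) =====
-- def subsecuencia_mas_larga_version_2(tipos_pacientes_atendidos: list[int]) -> int:
--     res:int = 0
--     largo_max:int = 0
--     largo_actual:int = 0
--     indice:int = 0
--     for t in tipos_pacientes_atendidos:
--
--         if t == "perro" or t == "gato":
--             largo_actual +=1
--         else:
--             if largo_max < largo_actual:
--                 res = indice - largo_actual
--                 largo_max = largo_actual
--             largo_actual = 0
--         indice +=1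
--
--     if largo_max < largo_actual:
--         res = indice - largo_actual
--
--     return res
-- ===== SOURCE B (Python) =====
-- def subsecuencia_mas_larga_version_2(tipos_pacientes_atendidos):
--     # Pass 1: build the table of maximal runs of valid elements as (start, length).
--     runs = []
--     start = None
--     for i, t in enumerate(tipos_pacientes_atendidos):
--         if t == "perro" or t == "gato":
--             if start is None:
--                 start = i
--         else:
--             if start is not None:
--                 runs.append((start, i - start))
--                 start = None
--     if start is not None:
--         runs.append((start, len(tipos_pacientes_atendidos) - start))
--     # Pass 2: earliest longest run wins (strict <); default 0.
--     res = 0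
--     best = 0
--     for s, l in runs:
--         if best < l:
--             res = s
--             best = l
--     return res
-- ===== Notes on version B (the rewrite author's own statement) =====
-- stated objective: alternative
-- what changed: A maximizes inline while scanning with four mutable counters; B first materializes the table of maximal valid runs as (start, length) pairs in one pass, then selects the earliest longest run in a second pass over that table.
import Mathlib
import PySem

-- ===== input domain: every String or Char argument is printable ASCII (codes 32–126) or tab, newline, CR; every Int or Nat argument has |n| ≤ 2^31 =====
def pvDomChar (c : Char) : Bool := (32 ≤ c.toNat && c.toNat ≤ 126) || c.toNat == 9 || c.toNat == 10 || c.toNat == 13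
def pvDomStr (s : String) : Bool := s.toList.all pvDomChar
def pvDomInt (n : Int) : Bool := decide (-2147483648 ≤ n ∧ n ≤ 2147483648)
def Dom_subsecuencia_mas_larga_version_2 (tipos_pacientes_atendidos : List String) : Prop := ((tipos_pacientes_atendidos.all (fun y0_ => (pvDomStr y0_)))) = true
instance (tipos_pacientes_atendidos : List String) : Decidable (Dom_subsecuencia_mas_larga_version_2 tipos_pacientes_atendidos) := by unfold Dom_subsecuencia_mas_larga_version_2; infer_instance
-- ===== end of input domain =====

-- B replaces A's inline four-counter maximization by an explicit run table: one pass
-- builds the (start, length) list of maximal valid runs, a second pass selects the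
-- earliest longest run (objective: alternative decomposition, same O(n) cost).

-- ===== PORT A =====
-- loop body of A: state = (res, largo_max, largo_actual, indice)
def pvAStep (st : Int × Int × Int × Int) (t : String) : Int × Int × Int × Int :=
  if t == "perro" || t == "gato" then (st.1, st.2.1, st.2.2.1 + 1, st.2.2.2 + 1)
  else if st.2.1 < st.2.2.1 then (st.2.2.2 - st.2.2.1, st.2.2.1, 0, st.2.2.2 + 1)
  else (st.1, st.2.1, 0, st.2.2.2 + 1)

-- A's trailing check after the loop
def pvAFinish (st : Int × Int × Int × Int) : Int :=
  if st.2.1 < st.2.2.1 then st.2.2.2 - st.2.2.1 else st.1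

def subsecuencia_mas_larga_version_2 (tipos_pacientes_atendidos : List String) : Int :=
  pvAFinish (tipos_pacientes_atendidos.foldl pvAStep (0, 0, 0, 0))

-- ===== PORT B =====
-- pass-1 loop body: state = (runs, start); start = none ↔ no open run
def pvBuildStep (st : List (Int × Int) × Option Int) (p : Int × String) : List (Int × Int) × Option Int :=
  if p.2 == "perro" || p.2 == "gato" then
    match st.2 with
    | none => (st.1, some p.1)
    | some s0 => (st.1, some s0)
  else
    match st.2 with
    | none => (st.1, none)
    | some s0 => (st.1 ++ [(s0, p.1 - s0)], none)

-- close the trailing run (Source B's "if start is not None" after the loop)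
def pvClose (st : List (Int × Int) × Option Int) (endIdx : Int) : List (Int × Int) :=
  match st.2 with
  | none => st.1
  | some s0 => st.1 ++ [(s0, endIdx - s0)]

-- pass-2 loop body: state = (res, best)
def pvSelStep (rb : Int × Int) (p : Int × Int) : Int × Int :=
  if rb.2 < p.2 then p else rb

def subsecuencia_mas_larga_version_2_alt (tipos_pacientes_atendidos : List String) : Int :=
  let runs := pvClose ((PySem.List.enumerate tipos_pacientes_atendidos 0).foldl pvBuildStep ([], none))
      (tipos_pacientes_atendidos.length : Int)
  (runs.foldl pvSelStep (0, 0)).1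

-- ===== PRECONDITION & SPEC =====
def Spec_subsecuencia_mas_larga_version_2 (tipos_pacientes_atendidos : List String) (out : Int) : Prop := out = subsecuencia_mas_larga_version_2_alt tipos_pacientes_atendidos
instance (tipos_pacientes_atendidos : List String) (out : Int) : Decidable (Spec_subsecuencia_mas_larga_version_2 tipos_pacientes_atendidos out) := by unfold Spec_subsecuencia_mas_larga_version_2; infer_instance

-- ===== CLAIM (what is proved, stated in full; the proofs are below) =====
def Claim_equal_subsecuencia_mas_larga_version_2 : Prop := ∀ (tipos_pacientes_atendidos : List String), Dom_subsecuencia_mas_larga_version_2 tipos_pacientes_atendidos → Spec_subsecuencia_mas_larga_version_2 tipos_pacientes_atendidos (subsecuencia_mas_larga_version_2 tipos_pacientes_atendidos)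

-- ===== LEMMAS AND PROOFS =====

-- Invariant: if the select fold over the runs built so far reproduces A's (res, largo_max),
-- and the open run (if any) starts at indice - largo_actual, both sides finish equal.
theorem pv_key (xs : List String) : ∀ (res lmax lact idx : Int) (runs : List (Int × Int)),
    0 ≤ lact → 0 ≤ lmax →
    runs.foldl pvSelStep (0, 0) = (res, lmax) →
    ((pvClose ((PySem.List.enumerate xs idx).foldl pvBuildStep
        (runs, if lact = 0 then none else some (idx - lact))) (idx + (xs.length : Int))).foldl
          pvSelStep (0, 0)).1
      = pvAFinish (xs.foldl pvAStep (res, lmax, lact, idx)) := by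
  induction xs with
  | nil =>
    intro res lmax lact idx runs hlact hlmax hsel
    by_cases h : lact = 0
    · simp [h, pvClose, pvAFinish, hsel]
      omega
    · simp [h, pvClose, pvAFinish, List.foldl_append, hsel, pvSelStep]
      split_ifs <;> simp
  | cons x xs ih =>
    intro res lmax lact idx runs hlact hlmax hsel
    rw [PySem.List.enumerate_cons]
    by_cases hv : (x == "perro" || x == "gato") = true
    · -- valid element: A increments largo_actual, B keeps/opens the run
      by_cases h : lact = 0
      · simpa [h, pvBuildStep, hv, pvAStep, List.length_cons, show idx + ((xs.length : Int) + 1) = (idx + 1) + (xs.length : Int) by ring,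
          show lact + 1 ≠ 0 by omega, show idx + 1 - (lact + 1) = idx by omega] using
          ih res lmax (lact + 1) (idx + 1) runs (by omega) hlmax hsel
      · simpa [h, pvBuildStep, hv, pvAStep, List.length_cons, show idx + ((xs.length : Int) + 1) = (idx + 1) + (xs.length : Int) by ring,
          show lact + 1 ≠ 0 by omega, show idx + 1 - (lact + 1) = idx - lact by omega] using
          ih res lmax (lact + 1) (idx + 1) runs (by omega) hlmax hsel
    · -- invalid element: A closes the run, B appends it to the table
      by_cases h : lact = 0
      · have : ¬ lmax < (0:Int) := by omega
        simpa [h, pvBuildStep, hv, pvAStep, this, List.length_cons,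
          show idx + ((xs.length : Int) + 1) = (idx + 1) + (xs.length : Int) by ring] using
          ih res lmax 0 (idx + 1) runs le_rfl hlmax hsel
      · by_cases h2 : lmax < lact
        · simpa [h, pvBuildStep, hv, pvAStep, h2, List.length_cons,
            show idx + ((xs.length : Int) + 1) = (idx + 1) + (xs.length : Int) by ring,
            show idx - (idx - lact) = lact by ring] using
            ih (idx - lact) lact 0 (idx + 1) (runs ++ [(idx - lact, lact)]) le_rfl (by omega)
              (by simp [List.foldl_append, hsel, pvSelStep, h2])
        · simpa [h, pvBuildStep, hv, pvAStep, h2, List.length_cons,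
            show idx + ((xs.length : Int) + 1) = (idx + 1) + (xs.length : Int) by ring,
            show idx - (idx - lact) = lact by ring] using
            ih res lmax 0 (idx + 1) (runs ++ [(idx - lact, lact)]) le_rfl hlmax
              (by simp [List.foldl_append, hsel, pvSelStep, h2])

-- ===== VERDICT (by name: the statement is the Claim_ definition above) =====
theorem subsecuencia_mas_larga_version_2_spec : Claim_equal_subsecuencia_mas_larga_version_2 := by
  intro xs _
  unfold Spec_subsecuencia_mas_larga_version_2 subsecuencia_mas_larga_version_2
    subsecuencia_mas_larga_version_2_alt
  have h := pv_key xs 0 0 0 0 [] le_rfl le_rfl (by simp)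
  simpa using h.symm
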